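-- pv_equiv track=rewrite | github.com/dawilliams0727/data-structures | week2_priority_queues_and_disjoint_sets/2_job_queue/job_queue.py | assign_jobs
-- ===== SOURCE A (Python) =====
-- from collections import namedtuple
--
-- AssignedJob = namedtuple("AssignedJob", ["worker", "started_at"])
--
-- def assign_jobs(n_workers: int, jobs: list[int]) -> list[AssignedJob]:
--     # should the heap be of size n_workers?
--     H = [(0, i) for i in range(n_workers)]
--     result = []
--     # define pq functions
--     # Parent
--     def Parent(i: int) -> int:
--         return (i-1) // 2
--     # LeftChild
--     def LeftChild(i: int) -> int:
--         return (i * 2) + 1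
--     # RightChild
--     def RightChild(i: int) -> int:
--         return (i * 2) + 2
--     # SiftUp
--     def SiftUp(i: int) -> None:
--         """
--         Sift ith node up to correct position in min heap tree
--         """
--         # do until i is the root or i is greater than it's parent
--         while i > 0 and H[Parent(i)] > H[i]:
--             # swap the location of i and parent
--             H[Parent(i)], H[i] = H[i], H[Parent(i)]
--             # set parent to i to check if this new node is in the correct place
--             i = Parent(i)
--     # SiftDown
--     def SiftDown(i: int) -> None:
--         # track minimum index
--         minIndex = i
--         left = LeftChild(i)
--         # if there is child and it is less than parent and ajust minIndex
--         if left < len(H) and H[left] < H[minIndex]: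
--             minIndex = left
--         right = RightChild(i)
--         if right < len(H) and H[right] < H[minIndex]:
--             minIndex = right
--         # if i isn't the smallest value
--         if i != minIndex:
--             # swap it with the smallest and shift down the larger if needed
--             H[i], H[minIndex] = H[minIndex], H[i]
--             SiftDown(minIndex)
--     # Insert
--     def Insert(p: tuple[int,int]) -> None:
--         # add the freed thread
--         H.append(p)
--         # sift up the thread to the correct position in priority queue
--         SiftUp(len(H) - 1)
--
--     # ExtractMin
--     def ExtractMin() -> tuple[int,int]:
--         result = H[0]
--         H[0] = H[-1]
--         H.pop()
--         SiftDown(0)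
--         return result
--
--     for job in jobs:
--         # get the next available thread for the job
--         free_time, thread = ExtractMin()
--         # "assign" the job by adding to the results list
--         assignment = AssignedJob(thread, free_time)
--         result.append(assignment)
--         # insert thread back into priority queue with its available time
--         Insert((free_time + job, thread))
--         assert len(H) == n_workers
--
--     return result
-- ===== SOURCE B (Python) =====
-- from collections import namedtuple
--
-- AssignedJob = namedtuple("AssignedJob", ["worker", "started_at"])
--
-- def assign_jobs(n_workers: int, jobs: list[int]) -> list[AssignedJob]:
--     # Plain list of per-worker free times; pick the (free_time, index)-minimal
--     # worker by a linear scan instead of maintaining a binary heap.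
--     free = [0] * n_workers
--     result = []
--     for job in jobs:
--         mi, best, i = 0, free[0], 0
--         for t in free:
--             if t < best:
--                 mi, best = i, t
--             i += 1
--         result.append(AssignedJob(mi, best))
--         free[mi] = best + job
--     return result
-- ===== Notes on version B (the rewrite author's own statement) =====
-- stated objective: simpler
-- what changed: Replaces the hand-rolled binary min-heap (SiftUp/SiftDown/Insert/ExtractMin) with a plain list of worker free times and a linear scan for the (free_time, index)-minimal worker each round, which reproduces the earliest-index tie-break directly.
import Mathlib
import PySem

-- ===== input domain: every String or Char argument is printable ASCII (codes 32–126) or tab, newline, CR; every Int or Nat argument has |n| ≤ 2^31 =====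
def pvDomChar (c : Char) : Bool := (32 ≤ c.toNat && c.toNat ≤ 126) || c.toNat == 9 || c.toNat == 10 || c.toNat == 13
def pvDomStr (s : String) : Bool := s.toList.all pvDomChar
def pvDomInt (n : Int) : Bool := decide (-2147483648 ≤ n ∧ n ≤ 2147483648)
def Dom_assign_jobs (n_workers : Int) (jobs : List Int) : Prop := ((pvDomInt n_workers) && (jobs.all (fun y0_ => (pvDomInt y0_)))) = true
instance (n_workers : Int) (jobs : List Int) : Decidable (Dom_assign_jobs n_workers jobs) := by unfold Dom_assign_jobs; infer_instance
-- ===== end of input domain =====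

-- B replaces A's hand-rolled binary min-heap with a plain free-time list scanned
-- linearly for the (free_time, index)-minimal worker (objective: simpler).


-- ===== PORT A =====
-- Python tuple comparison (a, b) < (c, d) on int pairs (lexicographic)
def pltB (a b : Int × Int) : Bool := a.1 < b.1 || (a.1 == b.1 && a.2 < b.2)

-- simultaneous assignment H[i], H[j] = H[j], H[i]
def pvSwap (H : List (Int × Int)) (i j : Nat) : List (Int × Int) :=
  (H.set i (H.getD j (0, 0))).set j (H.getD i (0, 0))

-- SiftUp: while i > 0 and H[Parent(i)] > H[i]: swap, i = Parent(i)
def pvSiftUp (H : List (Int × Int)) (i : Nat) : List (Int × Int) :=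
  if 0 < i ∧ pltB (H.getD i (0, 0)) (H.getD ((i - 1) / 2) (0, 0)) = true then
    pvSiftUp (pvSwap H ((i - 1) / 2) i) ((i - 1) / 2)
  else H
termination_by i
decreasing_by omega

-- SiftDown's minIndex computation (left then right child test, in A's order)
def pvPickMin1 (H : List (Int × Int)) (i : Nat) : Nat :=
  if 2 * i + 1 < H.length ∧ pltB (H.getD (2 * i + 1) (0, 0)) (H.getD i (0, 0)) = true
    then 2 * i + 1 else i

def pvPickMin (H : List (Int × Int)) (i : Nat) : Nat :=
  if 2 * i + 2 < H.length ∧ pltB (H.getD (2 * i + 2) (0, 0)) (H.getD (pvPickMin1 H i) (0, 0)) = true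
    then 2 * i + 2 else pvPickMin1 H i

theorem pvPickMin_gt (H : List (Int × Int)) (i : Nat) (h : pvPickMin H i ≠ i) :
    i < pvPickMin H i ∧ pvPickMin H i < H.length := by
  unfold pvPickMin pvPickMin1 at *
  split_ifs at * <;> omega

def pvSiftDown (H : List (Int × Int)) (i : Nat) : List (Int × Int) :=
  let m := pvPickMin H i
  if i ≠ m then pvSiftDown (pvSwap H i m) m else H
termination_by H.length - i
decreasing_by
  have hb := pvPickMin_gt H i (by omega)
  simp only [pvSwap, List.length_set]
  omega

-- the job loop: ExtractMin, record assignment, Insert freed worker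
def pvLoopA (H : List (Int × Int)) (res : List (Int × Int)) (jobs : List Int) :
    List (Int × Int) :=
  match jobs with
  | [] => res
  | job :: rest =>
    let fm := H.getD 0 (0, 0)
    let H1 := pvSiftDown ((H.set 0 (H.getD (H.length - 1) (0, 0))).dropLast) 0
    let H2 := pvSiftUp (H1 ++ [(fm.1 + job, fm.2)]) ((H1 ++ [(fm.1 + job, fm.2)]).length - 1)
    pvLoopA H2 (res ++ [(fm.2, fm.1)]) rest

def assign_jobs (n_workers : Int) (jobs : List Int) : List (Int × Int) :=
  pvLoopA ((PySem.List.pyRange 0 n_workers 1).map (fun i => ((0 : Int), i))) [] jobs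

-- ===== PORT B =====
-- the inner loop's body: state (mi, best, i), keep a strictly smaller free time
def pvScanStep (acc : Int × Int × Int) (t : Int) : Int × Int × Int :=
  if t < acc.2.1 then (acc.2.2, t, acc.2.2 + 1) else (acc.1, acc.2.1, acc.2.2 + 1)

def pvLoopB (free : List Int) (res : List (Int × Int)) (jobs : List Int) :
    List (Int × Int) :=
  match jobs with
  | [] => res
  | job :: rest =>
    let s := free.foldl pvScanStep (0, free.getD 0 0, 0)
    pvLoopB (free.set s.1.toNat (s.2.1 + job)) (res ++ [(s.1, s.2.1)]) rest

def assign_jobs_alt (n_workers : Int) (jobs : List Int) : List (Int × Int) :=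
  pvLoopB (List.replicate n_workers.toNat 0) [] jobs

-- ===== PRECONDITION & SPEC =====
-- Pre_ excludes exactly the inputs where A raises IndexError (no worker but jobs to assign).
def Pre_assign_jobs (n_workers : Int) (jobs : List Int) : Prop :=
  jobs = [] ∨ 1 ≤ n_workers
instance (n_workers : Int) (jobs : List Int) : Decidable (Pre_assign_jobs n_workers jobs) := by
  unfold Pre_assign_jobs; infer_instance

def pvWitness_assign_jobs : Int × List Int := (2, [1, 2, 3])

def Spec_assign_jobs (n_workers : Int) (jobs : List Int) (out : List (Int × Int)) : Prop := out = assign_jobs_alt n_workers jobs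
instance (n_workers : Int) (jobs : List Int) (out : List (Int × Int)) : Decidable (Spec_assign_jobs n_workers jobs out) := by unfold Spec_assign_jobs; infer_instance

-- ===== CLAIM (what is proved, stated in full; the proofs are below) =====
def Claim_equal_assign_jobs : Prop := ∀ (n_workers : Int) (jobs : List Int), Dom_assign_jobs n_workers jobs → Pre_assign_jobs n_workers jobs → Spec_assign_jobs n_workers jobs (assign_jobs n_workers jobs)

-- ===== LEMMAS AND PROOFS =====

-- lexicographic order facts, all by unfolding pltB and omega
theorem pltB_true_iff (a b : Int × Int) :
    pltB a b = true ↔ a.1 < b.1 ∨ (a.1 = b.1 ∧ a.2 < b.2) := by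
  simp [pltB]

theorem pltB_false_iff (a b : Int × Int) :
    pltB a b = false ↔ b.1 < a.1 ∨ (b.1 = a.1 ∧ b.2 ≤ a.2) := by
  simp [pltB]; omega

theorem pltB_irrefl (a : Int × Int) : pltB a a = false := by
  simp [pltB]

theorem pltB_asymm {a b : Int × Int} (h : pltB a b = true) : pltB b a = false := by
  rw [pltB_true_iff] at h; rw [pltB_false_iff]; omega

theorem pltB_le_trans {a b c : Int × Int} (h1 : pltB a b = false) (h2 : pltB b c = false) :
    pltB a c = false := by
  rw [pltB_false_iff] at h1 h2 ⊢; omega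

theorem pltB_antisymm {a b : Int × Int} (h1 : pltB a b = false) (h2 : pltB b a = false) :
    a = b := by
  rw [pltB_false_iff] at h1 h2
  obtain ⟨a1, a2⟩ := a; obtain ⟨b1, b2⟩ := b
  simp at *; omega

-- heap predicate and the two "heap except around i" invariants
def IsHeap (H : List (Int × Int)) : Prop :=
  ∀ j, 0 < j → j < H.length →
    pltB (H.getD j (0, 0)) (H.getD ((j - 1) / 2) (0, 0)) = false

-- invariant for pvSiftDown at i: all parent edges hold except those from i,
-- and i's children are already ≥ i's parent
def AHD (i : Nat) (H : List (Int × Int)) : Prop :=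
  (∀ j, 0 < j → j < H.length → (j - 1) / 2 ≠ i →
    pltB (H.getD j (0, 0)) (H.getD ((j - 1) / 2) (0, 0)) = false) ∧
  (∀ j, j < H.length → (j - 1) / 2 = i → 0 < j → 0 < i →
    pltB (H.getD j (0, 0)) (H.getD ((i - 1) / 2) (0, 0)) = false)

-- invariant for pvSiftUp at i: all parent edges hold except the one at i,
-- and i's children are already ≥ i's parent
def AHU (i : Nat) (H : List (Int × Int)) : Prop :=
  (∀ j, 0 < j → j < H.length → j ≠ i →
    pltB (H.getD j (0, 0)) (H.getD ((j - 1) / 2) (0, 0)) = false) ∧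
  (∀ j, j < H.length → (j - 1) / 2 = i → 0 < j → j ≠ i → 0 < i →
    pltB (H.getD j (0, 0)) (H.getD ((i - 1) / 2) (0, 0)) = false)

theorem getD_set_self {l : List (Int × Int)} {i : Nat} {a : Int × Int} (h : i < l.length) :
    (l.set i a).getD i (0, 0) = a := by
  simp [List.getD_eq_getElem?_getD, h]

theorem getD_set_ne {l : List (Int × Int)} {i j : Nat} {a : Int × Int} (h : i ≠ j) :
    (l.set i a).getD j (0, 0) = l.getD j (0, 0) := by
  simp [List.getD_eq_getElem?_getD, List.getElem?_set_ne h]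

theorem swap_getD_left {H : List (Int × Int)} {i j : Nat} (hij : i ≠ j) (hi : i < H.length) :
    (pvSwap H i j).getD i (0, 0) = H.getD j (0, 0) := by
  rw [pvSwap, getD_set_ne (Ne.symm hij), getD_set_self hi]

theorem swap_getD_right {H : List (Int × Int)} {i j : Nat} (hj : j < H.length) :
    (pvSwap H i j).getD j (0, 0) = H.getD i (0, 0) := by
  rw [pvSwap, getD_set_self (by simpa using hj)]

theorem swap_getD_other {H : List (Int × Int)} {i j k : Nat} (h1 : k ≠ i) (h2 : k ≠ j) :
    (pvSwap H i j).getD k (0, 0) = H.getD k (0, 0) := by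
  rw [pvSwap, getD_set_ne (Ne.symm h2), getD_set_ne (Ne.symm h1)]

theorem swap_length (H : List (Int × Int)) (i j : Nat) :
    (pvSwap H i j).length = H.length := by
  simp [pvSwap]

theorem getD_cons_set_perm : ∀ (t : List (Int × Int)) (k : Nat) (x : Int × Int),
    k < t.length → ((t.getD k (0, 0)) :: t.set k x).Perm (x :: t) := by
  intro t
  induction t with
  | nil => intro k x hk; simp at hk
  | cons y t' ih =>
    intro k x hk
    match k with
    | 0 => simpa using List.Perm.swap x y t'
    | k + 1 =>
      simp only [List.getD_cons_succ, List.set_cons_succ]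
      refine (List.Perm.swap y _ _).trans (((ih k x (by simpa using hk)).cons y).trans ?_)
      exact List.Perm.swap x y t'

theorem swap_perm : ∀ {H : List (Int × Int)} {i j : Nat}, i < j → j < H.length →
    (pvSwap H i j).Perm H := by
  intro H
  induction H with
  | nil => intro i j _ hj; simp at hj
  | cons x t ih =>
    intro i j hij hj
    match i, j with
    | 0, m + 1 =>
      simp only [pvSwap, List.getD_cons_succ, List.getD_cons_zero, List.set_cons_zero,
        List.set_cons_succ]
      exact getD_cons_set_perm t m x (by simpa using hj)
    | k + 1, m + 1 =>
      simp only [pvSwap, List.getD_cons_succ, List.set_cons_succ]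
      exact (ih (by omega) (by simpa using hj)).cons x

theorem swap_perm' {H : List (Int × Int)} {i j : Nat} (hij : i ≠ j) (hi : i < H.length)
    (hj : j < H.length) : (pvSwap H i j).Perm H := by
  rcases Nat.lt_or_ge i j with h | h
  · exact swap_perm h hj
  · have hlt : j < i := by omega
    have : pvSwap H i j = pvSwap H j i := by
      rw [pvSwap, pvSwap, List.set_comm _ _ hij]
    rw [this]
    exact swap_perm hlt hi

theorem pltB_lt_trans {a b c : Int × Int} (h1 : pltB a b = true) (h2 : pltB b c = true) :
    pltB a c = true := by
  rw [pltB_true_iff] at h1 h2 ⊢; omega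

theorem pvPickMin_child (H : List (Int × Int)) (i : Nat) (h : pvPickMin H i ≠ i) :
    pvPickMin H i = 2 * i + 1 ∨ pvPickMin H i = 2 * i + 2 := by
  unfold pvPickMin pvPickMin1 at *
  split_ifs at * <;> omega

theorem pvPickMin_spec (H : List (Int × Int)) (i : Nat) (h : pvPickMin H i ≠ i) :
    pltB (H.getD (pvPickMin H i) (0, 0)) (H.getD i (0, 0)) = true ∧
    ∀ j, j < H.length → (j = 2 * i + 1 ∨ j = 2 * i + 2) →
      pltB (H.getD j (0, 0)) (H.getD (pvPickMin H i) (0, 0)) = false := by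
  by_cases hC1 : 2 * i + 1 < H.length ∧ pltB (H.getD (2 * i + 1) (0, 0)) (H.getD i (0, 0)) = true
  · have hm1 : pvPickMin1 H i = 2 * i + 1 := by rw [pvPickMin1, if_pos hC1]
    by_cases hC2 : 2 * i + 2 < H.length ∧
        pltB (H.getD (2 * i + 2) (0, 0)) (H.getD (pvPickMin1 H i) (0, 0)) = true
    · have hm : pvPickMin H i = 2 * i + 2 := by rw [pvPickMin, if_pos hC2]
      rw [hm1] at hC2
      refine ⟨by rw [hm]; exact pltB_lt_trans hC2.2 hC1.2, ?_⟩
      rintro j hj (rfl | rfl)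
      · rw [hm]; exact pltB_asymm hC2.2
      · rw [hm]; exact pltB_irrefl _
    · have hm : pvPickMin H i = 2 * i + 1 := by rw [pvPickMin, if_neg hC2, hm1]
      rw [hm1] at hC2
      refine ⟨by rw [hm]; exact hC1.2, ?_⟩
      rintro j hj (rfl | rfl)
      · rw [hm]; exact pltB_irrefl _
      · rw [hm]
        have : ¬ pltB (H.getD (2 * i + 2) (0, 0)) (H.getD (2 * i + 1) (0, 0)) = true := by
          intro hx; exact hC2 ⟨hj, hx⟩
        exact Bool.eq_false_iff.mpr this
  · have hm1 : pvPickMin1 H i = i := by rw [pvPickMin1, if_neg hC1]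
    by_cases hC2 : 2 * i + 2 < H.length ∧
        pltB (H.getD (2 * i + 2) (0, 0)) (H.getD (pvPickMin1 H i) (0, 0)) = true
    · have hm : pvPickMin H i = 2 * i + 2 := by rw [pvPickMin, if_pos hC2]
      rw [hm1] at hC2
      refine ⟨by rw [hm]; exact hC2.2, ?_⟩
      rintro j hj (rfl | rfl)
      · rw [hm]
        have h1 : ¬ pltB (H.getD (2 * i + 1) (0, 0)) (H.getD i (0, 0)) = true := by
          intro hx; exact hC1 ⟨hj, hx⟩
        have h1' := Bool.eq_false_iff.mpr h1
        have h2 := hC2.2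
        rw [pltB_false_iff] at h1' ⊢; rw [pltB_true_iff] at h2; omega
      · rw [hm]; exact pltB_irrefl _
    · have hm : pvPickMin H i = i := by rw [pvPickMin, if_neg hC2, hm1]
      exact absurd hm h

theorem pvPickMin_eq_spec (H : List (Int × Int)) (i : Nat) (h : pvPickMin H i = i) :
    ∀ j, j < H.length → (j = 2 * i + 1 ∨ j = 2 * i + 2) →
      pltB (H.getD j (0, 0)) (H.getD i (0, 0)) = false := by
  by_cases hC1 : 2 * i + 1 < H.length ∧ pltB (H.getD (2 * i + 1) (0, 0)) (H.getD i (0, 0)) = true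
  · exfalso
    have hm1 : pvPickMin1 H i = 2 * i + 1 := by rw [pvPickMin1, if_pos hC1]
    rw [pvPickMin] at h
    split_ifs at h <;> omega
  · have hm1 : pvPickMin1 H i = i := by rw [pvPickMin1, if_neg hC1]
    rintro j hj (rfl | rfl)
    · exact Bool.eq_false_iff.mpr (fun hx => hC1 ⟨hj, hx⟩)
    · rw [pvPickMin, hm1] at h
      split_ifs at h with h2
      · omega
      · exact Bool.eq_false_iff.mpr (fun hx => h2 ⟨hj, hx⟩)

theorem siftDown_step {H : List (Int × Int)} {i : Nat} (hA : AHD i H)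
    (hne : pvPickMin H i ≠ i) : AHD (pvPickMin H i) (pvSwap H i (pvPickMin H i)) := by
  obtain ⟨he, hg⟩ := hA
  obtain ⟨him, hmlen⟩ := pvPickMin_gt H i hne
  obtain ⟨hlt, hch⟩ := pvPickMin_spec H i hne
  have hchild := pvPickMin_child H i hne
  set m := pvPickMin H i with hm
  have hilen : i < H.length := by omega
  constructor
  · intro j hj0 hjlen hpne
    rw [swap_length] at hjlen
    by_cases hji : j = i
    · subst hji
      rw [swap_getD_left (by omega) hilen, swap_getD_other (by omega) (by omega)]
      exact hg m hmlen (by omega) (by omega) hj0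
    · by_cases hjm : j = m
      · subst hjm
        have hpm : (m - 1) / 2 = i := by omega
        rw [hpm, swap_getD_right hmlen, swap_getD_left (by omega) hilen]
        exact pltB_asymm hlt
      · rw [swap_getD_other hji hjm]
        by_cases hqi : (j - 1) / 2 = i
        · rw [hqi, swap_getD_left (by omega) hilen]
          exact hch j hjlen (by omega)
        · rw [swap_getD_other hqi hpne]
          exact he j hj0 hjlen hqi
  · intro j hjlen hpj hj0 hm0
    rw [swap_length] at hjlen
    have hpm : (m - 1) / 2 = i := by omega
    have hji : j ≠ i := by omega
    have hjm : j ≠ m := by omega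
    rw [hpm, swap_getD_other hji hjm, swap_getD_left (by omega) hilen]
    have hres := he j hj0 hjlen (by omega)
    rw [hpj] at hres
    exact hres

theorem siftDown_heap : ∀ (H : List (Int × Int)) (i : Nat), AHD i H →
    IsHeap (pvSiftDown H i) := by
  intro H i hA
  induction H, i using pvSiftDown.induct with
  | case1 H i m hne ih =>
    rw [pvSiftDown]
    rw [if_pos (show i ≠ pvPickMin H i from hne)]
    exact ih (siftDown_step hA (by omega))
  | case2 H i m heq =>
    rw [pvSiftDown]
    rw [if_neg (show ¬ i ≠ pvPickMin H i from heq)]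
    intro j hj0 hjlen
    by_cases hq : (j - 1) / 2 = i
    · rw [hq]
      exact pvPickMin_eq_spec H i (by omega) j hjlen (by omega)
    · exact hA.1 j hj0 hjlen hq

theorem siftDown_perm : ∀ (H : List (Int × Int)) (i : Nat), (pvSiftDown H i).Perm H := by
  intro H i
  induction H, i using pvSiftDown.induct with
  | case1 H i m hne ih =>
    rw [pvSiftDown]
    rw [if_pos (show i ≠ pvPickMin H i from hne)]
    obtain ⟨him, hmlen⟩ := pvPickMin_gt H i (by omega)
    exact ih.trans (swap_perm' (by omega) (by omega) hmlen)
  | case2 H i m heq =>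
    rw [pvSiftDown]
    rw [if_neg (show ¬ i ≠ pvPickMin H i from heq)]

theorem siftUp_step {H : List (Int × Int)} {i : Nat} (hi : i < H.length) (h0 : 0 < i)
    (hlt : pltB (H.getD i (0, 0)) (H.getD ((i - 1) / 2) (0, 0)) = true) (hA : AHU i H) :
    AHU ((i - 1) / 2) (pvSwap H ((i - 1) / 2) i) := by
  obtain ⟨he, hgc⟩ := hA
  set p := (i - 1) / 2 with hp
  have hpi : p < i := by omega
  have hplen : p < H.length := by omega
  constructor
  · intro j hj0 hjlen hjp
    rw [swap_length] at hjlen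
    by_cases hji : j = i
    · subst hji
      rw [show (j - 1) / 2 = p from rfl, swap_getD_right (by omega),
        swap_getD_left (by omega) hplen]
      exact pltB_asymm hlt
    · rw [swap_getD_other hjp hji]
      by_cases hqp : (j - 1) / 2 = p
      · rw [hqp, swap_getD_left (by omega) hplen]
        have h1 := he j hj0 hjlen hji
        rw [hqp] at h1
        rw [pltB_false_iff] at h1 ⊢
        rw [pltB_true_iff] at hlt
        omega
      · by_cases hqi : (j - 1) / 2 = i
        · rw [hqi, swap_getD_right (by omega)]
          exact hgc j hjlen hqi hj0 hji h0
        · rw [swap_getD_other hqp hqi]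
          exact he j hj0 hjlen hji
  · intro j hjlen hpj hj0 hjp hp0
    rw [swap_length] at hjlen
    have hq : (p - 1) / 2 ≠ p := by omega
    have hqi : (p - 1) / 2 ≠ i := by omega
    rw [swap_getD_other hq hqi]
    by_cases hji : j = i
    · subst hji
      rw [swap_getD_right (by omega)]
      exact he p hp0 hplen (by omega)
    · rw [swap_getD_other hjp hji]
      have h1 := he j hj0 hjlen hji
      rw [hpj] at h1
      exact pltB_le_trans h1 (he p hp0 hplen (by omega))

theorem siftUp_heap : ∀ (i : Nat) (H : List (Int × Int)), i < H.length → AHU i H →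
    IsHeap (pvSiftUp H i) := by
  intro i
  induction i using Nat.strong_induction_on with
  | _ i ih =>
    intro H hi hA
    rw [pvSiftUp]
    split_ifs with hc
    · exact ih ((i - 1) / 2) (by omega) _ (by rw [swap_length]; omega)
        (siftUp_step hi hc.1 hc.2 hA)
    · intro j hj0 hjlen
      by_cases hji : j = i
      · subst hji
        rcases Nat.eq_zero_or_pos j with h0 | h0
        · omega
        · have : ¬ pltB (H.getD j (0, 0)) (H.getD ((j - 1) / 2) (0, 0)) = true := by
            intro hx; exact hc ⟨h0, hx⟩
          exact Bool.eq_false_iff.mpr this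
      · exact hA.1 j hj0 hjlen hji

theorem siftUp_perm : ∀ (i : Nat) (H : List (Int × Int)), i < H.length →
    (pvSiftUp H i).Perm H := by
  intro i
  induction i using Nat.strong_induction_on with
  | _ i ih =>
    intro H hi
    rw [pvSiftUp]
    split_ifs with hc
    · exact (ih ((i - 1) / 2) (by omega) _ (by rw [swap_length]; omega)).trans
        (swap_perm (by omega) hi)
    · exact List.Perm.refl H

theorem root_min {H : List (Int × Int)} (hH : IsHeap H) :
    ∀ j, j < H.length → pltB (H.getD j (0, 0)) (H.getD 0 (0, 0)) = false := by
  intro j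
  induction j using Nat.strong_induction_on with
  | _ j ih =>
    intro hj
    rcases Nat.eq_zero_or_pos j with h0 | h0
    · subst h0; exact pltB_irrefl _
    · exact pltB_le_trans (hH j h0 hj) (ih ((j - 1) / 2) (by omega) (by omega))

-- proof-layer model of B's inner loop: the same scan over explicit (index, value) pairs
def pvScanGo (acc : Int × Int) (l : List (Int × Int)) : Int × Int :=
  match l with
  | [] => acc
  | p :: rest => pvScanGo (if p.2 < acc.2 then p else acc) rest

-- B's fold with its counter computes exactly that scan over enumerate(free)
theorem foldl_scan : ∀ (l : List Int) (mi best i : Int),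
    ((l.foldl pvScanStep (mi, best, i)).1, (l.foldl pvScanStep (mi, best, i)).2.1) =
      pvScanGo (mi, best) (PySem.List.enumerate l i) := by
  intro l
  induction l with
  | nil => intros; rfl
  | cons t rest ih =>
    intro mi best i
    rw [PySem.List.enumerate_cons]
    show ((rest.foldl pvScanStep (pvScanStep (mi, best, i) t)).1,
        (rest.foldl pvScanStep (pvScanStep (mi, best, i) t)).2.1) =
      pvScanGo (if ((i, t) : Int × Int).2 < ((mi, best) : Int × Int).2 then (i, t)
        else (mi, best)) (PySem.List.enumerate rest (i + 1))
    by_cases h : t < best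
    · simp only [pvScanStep, if_pos h]
      exact ih i t (i + 1)
    · simp only [pvScanStep, if_neg h]
      exact ih mi best (i + 1)

-- B's scan returns the lexicographically (value, index)-minimal entry
theorem scanGo_spec : ∀ (l : List (Int × Int)) (acc : Int × Int),
    (acc :: l).Pairwise (fun p q => p.1 < q.1) →
    (pvScanGo acc l = acc ∨ pvScanGo acc l ∈ l) ∧
    ∀ p ∈ acc :: l, pltB (p.2, p.1) ((pvScanGo acc l).2, (pvScanGo acc l).1) = false := by
  intro l
  induction l with
  | nil =>
    intro acc _
    refine ⟨Or.inl rfl, ?_⟩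
    intro p hp
    simp only [List.mem_singleton] at hp
    subst hp
    exact pltB_irrefl _
  | cons q rest ih =>
    intro acc hPW
    obtain ⟨hacc, hPW1⟩ := List.pairwise_cons.mp hPW
    obtain ⟨hq, hPWrest⟩ := List.pairwise_cons.mp hPW1
    have hstep : pvScanGo acc (q :: rest) = pvScanGo (if q.2 < acc.2 then q else acc) rest := rfl
    by_cases hlt : q.2 < acc.2
    · have hPW' : (q :: rest).Pairwise (fun p q => p.1 < q.1) := hPW1
      obtain ⟨hmem, hmin⟩ := ih q hPW'
      rw [hstep, if_pos hlt]
      refine ⟨?_, ?_⟩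
      · rcases hmem with h | h
        · rw [h]; exact Or.inr (List.mem_cons_self ..)
        · exact Or.inr (List.mem_cons_of_mem _ h)
      · intro p hp
        rcases List.mem_cons.mp hp with rfl | hp'
        · have h1 := hmin q (List.mem_cons_self ..)
          have h2 : pltB (p.2, p.1) (q.2, q.1) = false := by
            rw [pltB_false_iff]; simp; omega
          exact pltB_le_trans h2 h1
        · exact hmin p hp'
    · have hPW' : (acc :: rest).Pairwise (fun p q => p.1 < q.1) := by
        rw [List.pairwise_cons]
        exact ⟨fun b hb => hacc b (List.mem_cons_of_mem _ hb), hPWrest⟩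
      obtain ⟨hmem, hmin⟩ := ih acc hPW'
      rw [hstep, if_neg hlt]
      refine ⟨?_, ?_⟩
      · rcases hmem with h | h
        · exact Or.inl h
        · exact Or.inr (List.mem_cons_of_mem _ h)
      · intro p hp
        rcases List.mem_cons.mp hp with rfl | hp'
        · exact hmin p (List.mem_cons_self ..)
        · rcases List.mem_cons.mp hp' with rfl | hp''
          · have h1 := hmin acc (List.mem_cons_self ..)
            have h2 : pltB (p.2, p.1) (acc.2, acc.1) = false := by
              have := hacc p (List.mem_cons_self ..)
              rw [pltB_false_iff]; simp; omega
            exact pltB_le_trans h2 h1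
          · exact hmin p (List.mem_cons_of_mem _ hp'')

-- the multiset of (free_time, worker) pairs B maintains
def mkPairs (free : List Int) : List (Int × Int) :=
  (PySem.List.enumerate free 0).map (fun p => (p.2, p.1))

theorem getD_dropLast {l : List (Int × Int)} {i : Nat} (h : i < l.length - 1) :
    l.dropLast.getD i (0, 0) = l.getD i (0, 0) := by
  have h2 : i < l.dropLast.length := by simp; omega
  rw [List.getD_eq_getElem _ _ h2, List.getElem_dropLast,
    List.getD_eq_getElem _ _ (by simp at h2 ⊢; omega)]

theorem getD_append_left {L : List (Int × Int)} {q : Int × Int} {k : Nat} (h : k < L.length) :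
    (L ++ [q]).getD k (0, 0) = L.getD k (0, 0) := by
  rw [List.getD_eq_getElem _ _ (by simp; omega), List.getElem_append_left h,
    List.getD_eq_getElem _ _ h]

-- removing the root and moving the last element to position 0 is a permutation
theorem extract_perm {H : List (Int × Int)} (hne : H ≠ []) :
    H.Perm (H.getD 0 (0, 0) :: (H.set 0 (H.getD (H.length - 1) (0, 0))).dropLast) := by
  obtain ⟨h, t, rfl⟩ := List.exists_cons_of_ne_nil hne
  rcases eq_or_ne t [] with rfl | htne
  · simp
  · have hlast : (h :: t).getD ((h :: t).length - 1) (0, 0) = t.getLast htne := by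
      have h1 : (h :: t).length - 1 = (t.length - 1) + 1 := by
        simp only [List.length_cons]
        have := List.length_pos_of_ne_nil htne
        omega
      rw [h1, List.getD_cons_succ,
        List.getD_eq_getElem _ _ (by have := List.length_pos_of_ne_nil htne; omega),
        List.getLast_eq_getElem]
    rw [hlast]
    simp only [List.getD_cons_zero, List.set_cons_zero]
    rw [List.dropLast_cons_of_ne_nil htne]
    refine List.Perm.cons h ?_
    conv_lhs => rw [← List.dropLast_concat_getLast htne]
    exact List.perm_append_singleton _ _

-- after the root is replaced, the list is a heap except at the root
theorem AHD_zero {H : List (Int × Int)} (hH : IsHeap H) (x : Int × Int) :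
    AHD 0 ((H.set 0 x).dropLast) := by
  constructor
  · intro j hj0 hjlen hq
    have hlen : ((H.set 0 x).dropLast).length = H.length - 1 := by simp
    rw [hlen] at hjlen
    rw [getD_dropLast (by simp; omega), getD_dropLast (by simp; omega),
      getD_set_ne (by omega), getD_set_ne (by omega)]
    exact hH j hj0 (by omega)
  · intro j hjlen hq hj0 hi0
    omega

-- appending a leaf leaves the list a heap except at the new leaf
theorem AHU_append {L : List (Int × Int)} (hL : IsHeap L) (q : Int × Int) :
    AHU L.length (L ++ [q]) := by
  constructor
  · intro j hj0 hjlen hji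
    have hjL : j < L.length := by simp at hjlen; omega
    rw [getD_append_left hjL, getD_append_left (by omega)]
    exact hL j hj0 hjL
  · intro j hjlen hpj hj0 hji hi0
    simp at hjlen
    omega

theorem getD_mem {H : List (Int × Int)} {j : Nat} (h : j < H.length) :
    H.getD j (0, 0) ∈ H := by
  rw [List.getD_eq_getElem _ _ h]
  exact List.getElem_mem h

theorem root_lb {H : List (Int × Int)} (hH : IsHeap H) :
    ∀ x ∈ H, pltB x (H.getD 0 (0, 0)) = false := by
  intro x hx
  obtain ⟨j, hj, rfl⟩ := List.mem_iff_getElem.mp hx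
  rw [← List.getD_eq_getElem _ (0, 0) hj]
  exact root_min hH j hj

-- decompose mkPairs at index k, before and after free[k] is overwritten
theorem mkPairs_set_perm (free : List Int) (k : Nat) (v : Int) (hk : k < free.length) :
    ∃ R, (mkPairs free).Perm ((free[k], (k : Int)) :: R) ∧
      (mkPairs (free.set k v)).Perm ((v, (k : Int)) :: R) := by
  refine ⟨((PySem.List.enumerate (free.take k) 0).map (fun p => (p.2, p.1))) ++
    ((PySem.List.enumerate (free.drop (k + 1)) ((k : Int) + 1)).map (fun p => (p.2, p.1))),
    ?_, ?_⟩
  · have hdecomp : free = free.take k ++ free[k] :: free.drop (k + 1) := by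
      conv_lhs => rw [← List.take_append_drop k free, List.drop_eq_getElem_cons hk]
    conv_lhs => rw [mkPairs, hdecomp]
    rw [PySem.List.enumerate_append, PySem.List.enumerate_cons]
    simp only [List.map_append, List.map_cons, List.length_take,
      Nat.min_eq_left (le_of_lt hk), zero_add]
    exact List.perm_middle
  · have hdecomp : free.set k v = free.take k ++ v :: free.drop (k + 1) :=
      List.set_eq_take_cons_drop v hk
    conv_lhs => rw [mkPairs, hdecomp]
    rw [PySem.List.enumerate_append, PySem.List.enumerate_cons]
    simp only [List.map_append, List.map_cons, List.length_take,
      Nat.min_eq_left (le_of_lt hk), zero_add]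
    exact List.perm_middle

-- characterize B's scan over a non-empty free list
theorem scan_spec (free : List Int) (hne : free ≠ []) :
    pvScanGo (0, free.getD 0 0) (PySem.List.enumerate free 0) ∈ PySem.List.enumerate free 0 ∧
    ∀ p ∈ PySem.List.enumerate free 0,
      pltB (p.2, p.1) ((pvScanGo (0, free.getD 0 0) (PySem.List.enumerate free 0)).2,
        (pvScanGo (0, free.getD 0 0) (PySem.List.enumerate free 0)).1) = false := by
  obtain ⟨h, t, rfl⟩ := List.exists_cons_of_ne_nil hne
  have henum : PySem.List.enumerate (h :: t) (0 : Int) =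
      ((0 : Int), h) :: PySem.List.enumerate t 1 := by
    rw [PySem.List.enumerate_cons]
    norm_num
  have hacc : ((0 : Int), (h :: t).getD 0 0) = ((0 : Int), h) := by simp
  have hstep : pvScanGo ((0 : Int), h) (((0 : Int), h) :: PySem.List.enumerate t 1) =
      pvScanGo ((0 : Int), h) (PySem.List.enumerate t 1) := by
    rw [pvScanGo]
    simp
  have hPW : (((0 : Int), h) :: PySem.List.enumerate t 1).Pairwise
      (fun p q => p.1 < q.1) := by
    rw [← henum]
    exact PySem.List.pairwise_lt_enumerate ..
  obtain ⟨hmem, hmin⟩ := scanGo_spec (PySem.List.enumerate t 1) ((0 : Int), h) hPW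
  rw [hacc, henum, hstep]
  constructor
  · rcases hmem with heq | hm
    · rw [heq]; exact List.mem_cons_self ..
    · exact List.mem_cons_of_mem _ hm
  · exact hmin

theorem loop_eq : ∀ (jobs : List Int) (free : List Int) (H res : List (Int × Int)),
    free ≠ [] → IsHeap H → H.Perm (mkPairs free) →
    pvLoopA H res jobs = pvLoopB free res jobs := by
  intro jobs
  induction jobs with
  | nil => intro free H res _ _ _; rfl
  | cons job rest ih =>
    intro free H res hfree hheap hperm
    have hlenm : (mkPairs free).length = free.length := by
      rw [mkPairs, List.length_map, PySem.List.length_enumerate]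
    have hlen : H.length = free.length := by rw [hperm.length_eq, hlenm]
    have hfl : 0 < free.length := List.length_pos_of_ne_nil hfree
    have hHne : H ≠ [] := by
      intro hx; rw [hx] at hlen; simp at hlen; omega
    obtain ⟨hrmem, hrmin⟩ := scan_spec free hfree
    set r := pvScanGo (0, free.getD 0 0) (PySem.List.enumerate free 0) with hr
    obtain ⟨k, hk, hrk⟩ : ∃ k, ∃ _ : k < free.length, r = ((k : Int), free[k]) := by
      obtain ⟨k, hkl, hpe⟩ := (PySem.List.mem_enumerate_iff ..).mp hrmem
      exact ⟨k, hkl, by rw [hpe]; norm_num⟩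
    set fm := H.getD 0 (0, 0) with hfm
    have hfm_mem : fm ∈ mkPairs free := hperm.mem_iff.mp (getD_mem (by omega))
    have hflipr_mem : ((r.2, r.1) : Int × Int) ∈ mkPairs free := by
      rw [mkPairs]
      exact List.mem_map_of_mem hrmem
    have hfm_lb : pltB (r.2, r.1) fm = false :=
      root_lb hheap _ (hperm.mem_iff.mpr hflipr_mem)
    have hflipr_lb : pltB fm (r.2, r.1) = false := by
      rw [mkPairs] at hfm_mem
      obtain ⟨p, hp, hpe⟩ := List.mem_map.mp hfm_mem
      rw [← hpe]
      exact hrmin p hp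
    have hfmr : fm = (r.2, r.1) := pltB_antisymm hflipr_lb hfm_lb
    have hfmk : fm = (free[k], (k : Int)) := by rw [hfmr, hrk]
    -- heap facts for the next iteration
    have hH1'A : AHD 0 ((H.set 0 (H.getD (H.length - 1) (0, 0))).dropLast) :=
      AHD_zero hheap _
    have hH1heap : IsHeap (pvSiftDown ((H.set 0 (H.getD (H.length - 1) (0, 0))).dropLast) 0) :=
      siftDown_heap _ 0 hH1'A
    have hH1perm := siftDown_perm ((H.set 0 (H.getD (H.length - 1) (0, 0))).dropLast) 0
    have hconsperm : H.Perm (fm :: (H.set 0 (H.getD (H.length - 1) (0, 0))).dropLast) :=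
      extract_perm hHne
    obtain ⟨R, hR1, hR2⟩ := mkPairs_set_perm free k (free[k] + job) hk
    have hDR : ((H.set 0 (H.getD (H.length - 1) (0, 0))).dropLast).Perm R := by
      have h1 : (fm :: (H.set 0 (H.getD (H.length - 1) (0, 0))).dropLast).Perm (fm :: R) := by
        refine hconsperm.symm.trans (hperm.trans ?_)
        rw [hfmk]
        exact hR1
      exact h1.cons_inv
    rw [pvLoopA, pvLoopB]
    have hs : ((free.foldl pvScanStep (0, free.getD 0 0, 0)).1,
        (free.foldl pvScanStep (0, free.getD 0 0, 0)).2.1) = r :=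
      (foldl_scan free 0 (free.getD 0 0) 0).trans hr.symm
    have hs1 : (free.foldl pvScanStep (0, free.getD 0 0, 0)).1 = r.1 :=
      congrArg Prod.fst hs
    have hs2 : (free.foldl pvScanStep (0, free.getD 0 0, 0)).2.1 = r.2 :=
      congrArg Prod.snd hs
    rw [hs1, hs2]
    have hq : ((fm.1 + job, fm.2) : Int × Int) = (free[k] + job, (k : Int)) := by
      rw [hfmk]
    have hout : ((fm.2, fm.1) : Int × Int) = (r.1, r.2) := by
      rw [hfmr]
    have hsetidx : r.1.toNat = k := by rw [hrk]; exact Int.toNat_natCast k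
    have hval : r.2 + job = free[k] + job := by rw [hrk]
    rw [hq, hout, hsetidx, hval]
    apply ih
    · intro hx
      have hl := congrArg List.length hx
      rw [List.length_set] at hl
      simp only [List.length_nil] at hl
      omega
    · have hlen2 :
          ((pvSiftDown ((H.set 0 (H.getD (H.length - 1) (0, 0))).dropLast) 0 ++
            [((free[k] + job, (k : Int)) : Int × Int)]).length - 1) =
          (pvSiftDown ((H.set 0 (H.getD (H.length - 1) (0, 0))).dropLast) 0).length := by
        simp
      rw [hlen2]
      exact siftUp_heap _ _ (by simp) (AHU_append hH1heap _)
    · have hlen2 :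
          ((pvSiftDown ((H.set 0 (H.getD (H.length - 1) (0, 0))).dropLast) 0 ++
            [((free[k] + job, (k : Int)) : Int × Int)]).length - 1) =
          (pvSiftDown ((H.set 0 (H.getD (H.length - 1) (0, 0))).dropLast) 0).length := by
        simp
      rw [hlen2]
      refine (siftUp_perm _ _ (by simp)).trans ?_
      refine (List.perm_append_singleton _ _).trans ?_
      refine ((hH1perm.trans hDR).cons _).trans ?_
      exact hR2.symm

-- the initial heap [(0, i) for i in range(n_workers)] is a heap …
theorem init_heap (n : Int) :
    IsHeap ((PySem.List.pyRange 0 n 1).map (fun i => ((0 : Int), i))) := by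
  intro j hj0 hjlen
  rw [List.length_map, PySem.List.length_pyRange_one] at hjlen
  have hget : ∀ m : Nat, m < (n - 0).toNat →
      ((PySem.List.pyRange 0 n 1).map (fun i => ((0 : Int), i))).getD m (0, 0) =
        ((0 : Int), ((0 : Int) + (m : Int))) := by
    intro m hm
    rw [List.getD_eq_getElem _ _ (by simp [PySem.List.length_pyRange_one]; omega)]
    rw [List.getElem_map, PySem.List.getElem_pyRange_one]
  rw [hget j hjlen, hget ((j - 1) / 2) (by omega)]
  rw [pltB_false_iff]
  right
  constructor
  · rfl
  · have : (j - 1) / 2 ≤ j := by omega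
    simp
    omega

-- … and represents the all-zero free-time list
theorem init_eq (n : Int) (hn : 0 ≤ n) :
    mkPairs (List.replicate n.toNat 0) =
      (PySem.List.pyRange 0 n 1).map (fun i => ((0 : Int), i)) := by
  have hlen : PySem.List.len (List.replicate n.toNat (0 : Int)) = n := by
    simp [PySem.List.len_eq]
    omega
  rw [mkPairs, PySem.List.enumerate_eq_map_pyRange _ (0 : Int), hlen, List.map_map]
  apply List.map_congr_left
  intro j hj
  obtain ⟨hj0, hjn⟩ := PySem.List.mem_pyRange_one.mp hj
  simp only [Function.comp_apply]
  rw [PySem.List.pyGetD_of_nonneg _ _ hj0]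
  rw [List.getD_eq_getElem _ _ (by simp; omega)]
  simp

-- ===== VERDICT (by name: the statement is the Claim_ definition above) =====
theorem assign_jobs_spec : Claim_equal_assign_jobs := by
  intro n jobs _ hpre
  show assign_jobs n jobs = assign_jobs_alt n jobs
  rw [assign_jobs, assign_jobs_alt]
  cases jobs with
  | nil => rfl
  | cons job rest =>
    have hn : 1 ≤ n := by
      rcases hpre with h | h
      · simp at h
      · exact h
    apply loop_eq
    · simp
      omega
    · exact init_heap n
    · rw [init_eq n (by omega)]
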